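-- pv_equiv track=rewrite | github.com/DinhTheBao1997/python-book-management | BookManagement_v2/service/service.py | FindTopScores
-- ===== SOURCE A (Python) =====
-- def FindTopScores(idList, scoreList):
--     greatestNumber = scoreList[0]
--     greatestNumberIndex = 0
--     scoreListLength = len(scoreList)
--     for i in range(scoreListLength):
--         if (greatestNumber < scoreList[i]):
--             greatestNumberIndex = i
--             greatestNumber = scoreList[i]
--         elif (greatestNumber == scoreList[i]):
--             greatestNumberIndex = i
--     return greatestNumberIndex
-- ===== SOURCE B (Python) =====
-- def FindTopScores(idList, scoreList):
--     # two passes: find the maximum value, then the last index holding it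
--     top = scoreList[0]
--     for x in scoreList:
--         if x > top:
--             top = x
--     best_i = 0
--     for i in range(len(scoreList)):
--         if scoreList[i] == top:
--             best_i = i
--     return best_i
-- ===== Notes on version B (the rewrite author's own statement) =====
-- stated objective: alternative
-- what changed: Single combined max-tracking pass replaced by two passes: one scan computes the maximum, a second scan records the last index equal to it.
import Mathlib
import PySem

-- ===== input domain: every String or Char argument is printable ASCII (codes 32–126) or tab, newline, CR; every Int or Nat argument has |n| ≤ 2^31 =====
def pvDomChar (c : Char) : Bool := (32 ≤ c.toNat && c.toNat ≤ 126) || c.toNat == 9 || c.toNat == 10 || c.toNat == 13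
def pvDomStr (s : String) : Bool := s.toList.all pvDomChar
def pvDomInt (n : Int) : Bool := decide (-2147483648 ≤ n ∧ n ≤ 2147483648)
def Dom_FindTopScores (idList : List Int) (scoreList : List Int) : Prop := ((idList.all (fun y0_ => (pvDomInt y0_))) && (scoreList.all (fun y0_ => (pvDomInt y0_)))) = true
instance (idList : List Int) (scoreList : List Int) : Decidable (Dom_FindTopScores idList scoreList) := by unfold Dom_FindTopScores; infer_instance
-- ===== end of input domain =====

-- B replaces A's single max-tracking pass by two passes (one computes the maximum, one records the last index equal to it); alternative decomposition, same cost.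


-- ===== PORT A =====
-- literal port of A: one pass over range(len(scoreList)), state (greatestNumber, greatestNumberIndex)
def FindTopScores (idList : List Int) (scoreList : List Int) : Int :=
  let greatestNumber := PySem.List.pyGetD scoreList 0 0
  let scoreListLength : Int := scoreList.length
  let st := (PySem.List.pyRange 0 scoreListLength 1).foldl
    (fun (s : Int × Int) i =>
      if s.1 < PySem.List.pyGetD scoreList i 0 then (PySem.List.pyGetD scoreList i 0, i)
      else if s.1 = PySem.List.pyGetD scoreList i 0 then (s.1, i)
      else s)
    (greatestNumber, 0)
  st.2

-- ===== PORT B =====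
-- literal port of B: pass 1 computes the maximum, pass 2 the last index equal to it
def FindTopScores_alt (idList : List Int) (scoreList : List Int) : Int :=
  let top := scoreList.foldl (fun t x => if x > t then x else t) (PySem.List.pyGetD scoreList 0 0)
  (PySem.List.pyRange 0 (scoreList.length : Int) 1).foldl
    (fun b i => if PySem.List.pyGetD scoreList i 0 = top then i else b) 0

-- ===== PRECONDITION & SPEC =====
-- Pre_ excludes only the empty scoreList, on which the Python A raises IndexError at scoreList[0].
def Pre_FindTopScores (idList : List Int) (scoreList : List Int) : Prop := scoreList ≠ []
instance (idList : List Int) (scoreList : List Int) : Decidable (Pre_FindTopScores idList scoreList) := by unfold Pre_FindTopScores; infer_instance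
def pvWitness_FindTopScores : List Int × List Int := ([1, 2], [5, 7])

def Spec_FindTopScores (idList : List Int) (scoreList : List Int) (out : Int) : Prop := out = FindTopScores_alt idList scoreList
instance (idList : List Int) (scoreList : List Int) (out : Int) : Decidable (Spec_FindTopScores idList scoreList out) := by unfold Spec_FindTopScores; infer_instance

-- ===== CLAIM (what is proved, stated in full; the proofs are below) =====
def Claim_equal_FindTopScores : Prop := ∀ (idList : List Int) (scoreList : List Int), Dom_FindTopScores idList scoreList → Pre_FindTopScores idList scoreList → Spec_FindTopScores idList scoreList (FindTopScores idList scoreList)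

-- ===== LEMMAS AND PROOFS =====

-- the running maximum is at least its initial value
theorem pv_init_le_foldl_max (l : List Int) (m : Int) :
    m ≤ l.foldl (fun t x => if x > t then x else t) m := by
  induction l generalizing m with
  | nil => simp
  | cons x t ih =>
    simp only [List.foldl_cons]
    refine le_trans ?_ (ih (if x > m then x else m))
    split <;> omega

-- the running maximum is its initial value or a member of the list
theorem pv_foldl_max_mem (l : List Int) (m : Int) :
    l.foldl (fun t x => if x > t then x else t) m = m ∨
    l.foldl (fun t x => if x > t then x else t) m ∈ l := by
  induction l generalizing m with
  | nil => simp
  | cons x t ih =>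
    simp only [List.foldl_cons]
    rcases ih (if x > m then x else m) with h | h
    · rw [h]; split_ifs <;> simp
    · right; exact List.mem_cons_of_mem _ h

-- core invariant: A's one-pass fold over enumerate returns the maximum paired with
-- B's last-index fold; the index seeds j, j' may differ once the maximum occurs later.
theorem pv_core (l : List Int) (k : Int) (m j j' : Int)
    (h : j = j' ∨ l.foldl (fun t x => if x > t then x else t) m ∈ l) :
    (PySem.List.enumerate l k).foldl
      (fun (s : Int × Int) p =>
        if s.1 < p.2 then (p.2, p.1) else if s.1 = p.2 then (s.1, p.1) else s) (m, j)
    = (l.foldl (fun t x => if x > t then x else t) m,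
       (PySem.List.enumerate l k).foldl
         (fun b p => if p.2 = l.foldl (fun t x => if x > t then x else t) m then p.1 else b) j') := by
  induction l generalizing k m j j' with
  | nil =>
    simp only [List.foldl_nil, List.not_mem_nil, or_false] at h ⊢
    simp [PySem.List.enumerate_nil, h]
  | cons x t ih =>
    rw [PySem.List.enumerate_cons]
    simp only [List.foldl_cons, List.mem_cons, gt_iff_lt] at h ⊢
    by_cases h1 : m < x
    · simp only [if_pos h1]
      by_cases h2 : x = t.foldl (fun a b => if a < b then b else a) x
      · rw [if_pos h2]; exact ih (k + 1) x k k (Or.inl rfl)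
      · rw [if_neg h2]
        refine ih (k + 1) x k j' (Or.inr ?_)
        rcases pv_foldl_max_mem t x with h3 | h3
        · simp only [gt_iff_lt] at h3; exact absurd h3.symm h2
        · simpa using h3
    · simp only [if_neg h1]
      by_cases h2 : m = x
      · simp only [if_pos h2]
        by_cases h3 : x = t.foldl (fun a b => if a < b then b else a) m
        · rw [if_pos h3]; exact ih (k + 1) m k k (Or.inl rfl)
        · rw [if_neg h3]
          refine ih (k + 1) m k j' (Or.inr ?_)
          rcases pv_foldl_max_mem t m with h4 | h4
          · simp only [gt_iff_lt] at h4; rw [h4] at h3; exact absurd h2.symm h3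
          · simpa using h4
      · simp only [if_neg h2]
        simp only [if_neg h1] at h
        have hle : m ≤ t.foldl (fun a b => if a < b then b else a) m := by
          have := pv_init_le_foldl_max t m; simpa [gt_iff_lt] using this
        have hxM : ¬ x = t.foldl (fun a b => if a < b then b else a) m := by omega
        rw [if_neg hxM]
        refine ih (k + 1) m j j' ?_
        simp only [gt_iff_lt]
        rcases h with h | h | h
        · exact Or.inl h
        · exact absurd h.symm hxM
        · exact Or.inr h

-- ===== VERDICT (by name: the statement is the Claim_ definition above) =====
theorem FindTopScores_spec : Claim_equal_FindTopScores := by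
  intro idList scoreList _ _
  unfold Spec_FindTopScores FindTopScores FindTopScores_alt
  have hcore := pv_core scoreList 0 (PySem.List.pyGetD scoreList 0 0) 0 0 (Or.inl rfl)
  rw [PySem.List.enumerate_eq_map_pyRange (d := 0), List.foldl_map, List.foldl_map] at hcore
  simp only [PySem.List.len_eq] at hcore
  simp only [hcore]
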